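-- pv_equiv track=rewrite | github.com/isavita/advent_generated | training_data/reflection-tuning/day20_part1_2017.py | find_closest_particle
-- ===== SOURCE A (Python) =====
-- def vector_magnitude(v):
--     return sum(abs(x) for x in v)
--
-- def find_closest_particle(particles):
--     min_acc = float('inf')
--     candidates = []
--
--     for i, (p, v, a) in enumerate(particles):
--         acc_mag = vector_magnitude(a)
--         if acc_mag < min_acc:
--             min_acc = acc_mag
--             candidates = [i]
--         elif acc_mag == min_acc:
--             candidates.append(i)
--
--     if len(candidates) == 1:
--         return candidates[0]
--
--     # Tiebreaker: compare velocities
--     min_vel = float('inf')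
--     vel_candidates = []
--     for i in candidates:
--         vel_mag = vector_magnitude(particles[i][1])
--         if vel_mag < min_vel:
--             min_vel = vel_mag
--             vel_candidates = [i]
--         elif vel_mag == min_vel:
--             vel_candidates.append(i)
--
--     if len(vel_candidates) == 1:
--         return vel_candidates[0]
--
--     # Final tiebreaker: compare initial positions
--     return min(vel_candidates, key=lambda i: vector_magnitude(particles[i][0]))
-- ===== SOURCE B (Python) =====
-- def vector_magnitude(v):
--     return sum(abs(x) for x in v)
--
-- def find_closest_particle(particles):
--     # One pass: lexicographic tuple key (|a|, |v|, |p|); min keeps the first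
--     # (= smallest-index) minimum, which is exactly A's staged tiebreaking.
--     return min(range(len(particles)),
--                key=lambda i: (vector_magnitude(particles[i][2]),
--                               vector_magnitude(particles[i][1]),
--                               vector_magnitude(particles[i][0])))
-- ===== Notes on version B (the rewrite author's own statement) =====
-- stated objective: simpler
-- what changed: Replaces A's three sequential candidate-filtering passes (accel list, then velocity re-filter, then a final min by position) with a single min over range(len(particles)) using a composite tuple key, letting lexicographic tuple comparison do the accel-velocity-position tiebreak in one pass.
import Mathlib
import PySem

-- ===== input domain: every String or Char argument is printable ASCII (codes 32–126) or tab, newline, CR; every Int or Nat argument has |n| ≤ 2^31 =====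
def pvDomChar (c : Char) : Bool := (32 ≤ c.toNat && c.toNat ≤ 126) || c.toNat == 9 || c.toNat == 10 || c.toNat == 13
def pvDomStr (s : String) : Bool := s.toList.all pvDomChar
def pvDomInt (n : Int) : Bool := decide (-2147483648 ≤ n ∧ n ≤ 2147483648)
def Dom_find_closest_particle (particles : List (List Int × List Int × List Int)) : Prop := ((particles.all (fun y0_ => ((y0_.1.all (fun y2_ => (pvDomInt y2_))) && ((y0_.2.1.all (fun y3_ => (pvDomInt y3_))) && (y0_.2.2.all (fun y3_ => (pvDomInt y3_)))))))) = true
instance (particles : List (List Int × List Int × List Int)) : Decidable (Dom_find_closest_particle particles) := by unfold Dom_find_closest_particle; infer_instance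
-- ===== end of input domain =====

-- B replaces A's three candidate-filtering passes by a single first-minimum scan
-- under a lexicographic (|a|,|v|,|p|) key: simpler, same O(n) cost.

-- ===== PORT A =====
-- helper vector_magnitude: sum(abs(x) for x in v)
def vector_magnitude (v : List Int) : Int := v.foldl (fun s x => s + |x|) 0

-- loop body shared by A's two candidate-collecting passes: running minimum of
-- `k x` plus the list of (projected) ties, reset on a strictly smaller key;
-- `none` models the initial float('inf')
def pvStep {α : Type} (k : α → Int) (π : α → Int) (s : Option Int × List Int) (x : α) : Option Int × List Int :=
  match s.1 with
  | none => (some (k x), [π x])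
  | some m =>
      if k x < m then (some (k x), [π x])
      else if k x = m then (s.1, s.2 ++ [π x])
      else s

-- literal port of A: stage over enumerate(particles), singleton shortcut,
-- stage over candidates (particles[i][1]), singleton shortcut, min by key.
-- Indices in candidates are valid non-negative positions, so pyGetD is exact;
-- the final min() is on a provably nonempty list under Pre_, so .getD 0 is never taken.
def find_closest_particle (particles : List (List Int × List Int × List Int)) : Int :=
  let s1 := (PySem.List.enumerate particles).foldl
      (pvStep (fun ip => vector_magnitude ip.2.2.2) (fun ip => ip.1)) (none, [])
  let candidates := s1.2
  if candidates.length = 1 then candidates.headD 0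
  else
    let s2 := candidates.foldl
        (pvStep (fun i => vector_magnitude ((PySem.List.pyGetD particles i ([], [], [])).2.1))
          (fun i => i)) (none, [])
    let velCandidates := s2.2
    if velCandidates.length = 1 then velCandidates.headD 0
    else
      (PySem.List.min? velCandidates
        (fun i => vector_magnitude ((PySem.List.pyGetD particles i ([], [], [])).1))).getD 0

-- ===== PORT B =====
-- Python's lexicographic `<` on 3-tuples of ints
def pvLex3lt (a b : Int × Int × Int) : Bool :=
  decide (a.1 < b.1) ||
    (decide (a.1 = b.1) &&
      (decide (a.2.1 < b.2.1) || (decide (a.2.1 = b.2.1) && decide (a.2.2 < b.2.2))))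

-- B's composite key (|a|, |v|, |p|) for index i
def pvKey3 (particles : List (List Int × List Int × List Int)) (i : Int) : Int × Int × Int :=
  let t := PySem.List.pyGetD particles i ([], [], [])
  (vector_magnitude t.2.2, vector_magnitude t.2.1, vector_magnitude t.1)

-- literal port of B: min(range(len(particles)), key=…) — hand-ported because the
-- key is a tuple (Python compares tuples lexicographically; min keeps the first
-- minimum). On [] Python's min raises ValueError (excluded by Pre_).
def find_closest_particle_alt (particles : List (List Int × List Int × List Int)) : Int :=
  match PySem.List.pyRange 0 (PySem.List.len particles) 1 with
  | [] => 0  -- unreachable under Pre_: Python raises ValueError here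
  | c :: rest =>
      rest.foldl (fun best i =>
        if pvLex3lt (pvKey3 particles i) (pvKey3 particles best) then i else best) c

-- ===== PRECONDITION & SPEC =====
-- Pre_ excludes only the empty list, where both A and B raise ValueError (min of an empty sequence).
def Pre_find_closest_particle (particles : List (List Int × List Int × List Int)) : Prop :=
  particles ≠ []
instance (particles : List (List Int × List Int × List Int)) : Decidable (Pre_find_closest_particle particles) := by unfold Pre_find_closest_particle; infer_instance

def pvWitness_find_closest_particle : (List (List Int × List Int × List Int)) :=
  [([1], [2], [3]), ([0], [0], [0])]

def Spec_find_closest_particle (particles : List (List Int × List Int × List Int)) (out : Int) : Prop := out = find_closest_particle_alt particles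
instance (particles : List (List Int × List Int × List Int)) (out : Int) : Decidable (Spec_find_closest_particle particles out) := by unfold Spec_find_closest_particle; infer_instance

-- ===== CLAIM (what is proved, stated in full; the proofs are below) =====
def Claim_equal_find_closest_particle : Prop := ∀ (particles : List (List Int × List Int × List Int)), Dom_find_closest_particle particles → Pre_find_closest_particle particles → Spec_find_closest_particle particles (find_closest_particle particles)

-- ===== LEMMAS AND PROOFS =====

theorem pvLex3lt_irrefl (a : Int × Int × Int) : pvLex3lt a a = false := by
  simp [pvLex3lt]

theorem pvLex3lt_trans {a b c : Int × Int × Int}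
    (h1 : pvLex3lt a b = true) (h2 : pvLex3lt b c = true) : pvLex3lt a c = true := by
  obtain ⟨a1, a2, a3⟩ := a; obtain ⟨b1, b2, b3⟩ := b; obtain ⟨c1, c2, c3⟩ := c
  simp [pvLex3lt] at *; omega

theorem pvLex3lt_antisymm {a b : Int × Int × Int}
    (h1 : pvLex3lt a b = false) (h2 : pvLex3lt b a = false) : a = b := by
  obtain ⟨a1, a2, a3⟩ := a; obtain ⟨b1, b2, b3⟩ := b
  simp [pvLex3lt] at h1 h2
  simp only [Prod.mk.injEq]
  omega

-- "first minimum" property of the fold `if lt (key x) (key m) then x else m`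
-- over a strictly increasing index list, for any strict linear order lt
theorem pvFoldMinFirst {κ : Type} (lt : κ → κ → Bool)
    (hirr : ∀ a, lt a a = false)
    (htr : ∀ {a b c}, lt a b = true → lt b c = true → lt a c = true)
    (htri : ∀ {a b}, lt a b = false → lt b a = false → a = b)
    (key : Int → κ) :
    ∀ (L : List Int) (b : Int), L.Pairwise (· < ·) → (∀ j ∈ L, b < j) →
      ((L.foldl (fun m x => if lt (key x) (key m) then x else m) b = b ∨
        L.foldl (fun m x => if lt (key x) (key m) then x else m) b ∈ L) ∧
       (∀ j, (j = b ∨ j ∈ L) →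
          lt (key j) (key (L.foldl (fun m x => if lt (key x) (key m) then x else m) b)) = false) ∧
       (∀ j, (j = b ∨ j ∈ L) →
          key j = key (L.foldl (fun m x => if lt (key x) (key m) then x else m) b) →
          L.foldl (fun m x => if lt (key x) (key m) then x else m) b ≤ j)) := by
  intro L
  induction L with
  | nil =>
      intro b _ _
      refine ⟨Or.inl rfl, ?_, ?_⟩
      · rintro j (rfl | h)
        · exact hirr _
        · simp at h
      · rintro j (rfl | h) _
        · exact le_refl _
        · simp at h
  | cons x L' ih =>
      intro b hpw hb
      have hx : b < x := hb x (by simp)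
      have hpw' := hpw.tail
      have hxL' : ∀ j ∈ L', x < j := (List.pairwise_cons.mp hpw).1
      have hbL' : ∀ j ∈ L', (if lt (key x) (key b) then x else b) < j := by
        intro j hj
        by_cases hc : lt (key x) (key b) = true
        · simp only [hc, if_pos]; exact hxL' j hj
        · simp only [hc, if_neg, Bool.false_eq_true, not_false_iff]
          exact lt_trans hx (hxL' j hj)
      obtain ⟨ihmem, ihmin, ihtie⟩ := ih (if lt (key x) (key b) then x else b) hpw' hbL'
      have step : (x :: L').foldl (fun m x => if lt (key x) (key m) then x else m) b
          = L'.foldl (fun m x => if lt (key x) (key m) then x else m)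
              (if lt (key x) (key b) then x else b) := rfl
      rw [step]
      set b' := if lt (key x) (key b) then x else b with hb'
      set r := L'.foldl (fun m x => if lt (key x) (key m) then x else m) b' with hr
      by_cases hc : lt (key x) (key b) = true
      · have hb'x : b' = x := by rw [hb', if_pos hc]
        have hxr : lt (key x) (key r) = false := ihmin x (Or.inl hb'x.symm)
        refine ⟨?_, ?_, ?_⟩
        · rcases ihmem with h | h
          · simp [h, hb'x]
          · exact Or.inr (List.mem_cons_of_mem _ h)
        · rintro j (rfl | hj)
          · cases hjr : lt (key j) (key r) with
            | false => rfl
            | true => exact absurd (htr hc hjr) (by simp [hxr])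
          · rcases List.mem_cons.mp hj with rfl | hj'
            · exact hxr
            · exact ihmin j (Or.inr hj')
        · rintro j (rfl | hj) hkey
          · rw [hkey] at hc
            exact absurd hc (by simp [hxr])
          · rcases List.mem_cons.mp hj with rfl | hj'
            · exact ihtie j (Or.inl hb'x.symm) hkey
            · exact ihtie j (Or.inr hj') hkey
      · have hcf : lt (key x) (key b) = false := by simpa using hc
        have hb'b : b' = b := by rw [hb', if_neg (by simp [hcf])]
        have hbr : lt (key b) (key r) = false := ihmin b (Or.inl hb'b.symm)
        refine ⟨?_, ?_, ?_⟩
        · rcases ihmem with h | h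
          · simp [h, hb'b]
          · exact Or.inr (List.mem_cons_of_mem _ h)
        · rintro j (rfl | hj)
          · exact hbr
          · rcases List.mem_cons.mp hj with rfl | hj'
            · cases hjr : lt (key j) (key r) with
              | false => rfl
              | true =>
                  have hbx : lt (key b) (key j) = false := by
                    cases h2 : lt (key b) (key j) with
                    | false => rfl
                    | true => exact absurd (htr h2 hjr) (by simp [hbr])
                  have hkk : key j = key b := htri hcf hbx
                  rw [hkk] at hjr
                  exact absurd hjr (by simp [hbr])
            · exact ihmin j (Or.inr hj')
        · rintro j (rfl | hj) hkey
          · exact ihtie j (Or.inl hb'b.symm) hkey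
          · rcases List.mem_cons.mp hj with rfl | hj'
            · have hbx : lt (key b) (key j) = false := by rw [hkey]; exact hbr
              have hkxb : key j = key b := htri hcf hbx
              have hrb : r ≤ b := ihtie b (Or.inl hb'b.symm) (by rw [← hkxb]; exact hkey)
              exact le_of_lt (lt_of_le_of_lt hrb hx)
            · exact ihtie j (Or.inr hj') hkey

-- closed form of one candidate-collecting pass of A: running minimum of the keys
-- plus, in order, the projections of all elements attaining it
theorem pvStage_spec {α : Type} (k : α → Int) (π : α → Int) (x : α) (xs : List α) :
    (x :: xs).foldl (pvStep k π) (none, []) =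
      (some ((xs.map k).foldl min (k x)),
       ((x :: xs).filter (fun y => decide (k y = (xs.map k).foldl min (k x)))).map π) := by
  induction xs using List.reverseRecOn with
  | nil => simp [pvStep]
  | append_singleton ys y ih =>
      have hM : ((ys ++ [y]).map k).foldl min (k x)
          = min ((ys.map k).foldl min (k x)) (k y) := by
        simp [List.foldl_append]
      set M := (ys.map k).foldl min (k x) with hMdef
      have hMle : M ≤ k x ∧ ∀ z ∈ ys.map k, M ≤ z := PySem.List.foldl_min_le _ _
      have hstep : (x :: (ys ++ [y])).foldl (pvStep k π) (none, [])
          = pvStep k π ((x :: ys).foldl (pvStep k π) (none, [])) y := by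
        rw [show x :: (ys ++ [y]) = (x :: ys) ++ [y] by simp, List.foldl_append]
        rfl
      rw [hstep, ih, hM]
      by_cases hlt : k y < M
      · have hmin : min M (k y) = k y := by omega
        rw [hmin]
        have hfilt : ((x :: (ys ++ [y])).filter (fun z => decide (k z = k y))).map π = [π y] := by
          have h1 : ∀ z ∈ x :: ys, ¬ (k z = k y) := by
            intro z hz
            rcases List.mem_cons.mp hz with rfl | hz
            · have := hMle.1; omega
            · have := hMle.2 (k z) (List.mem_map_of_mem hz); omega
          rw [show x :: (ys ++ [y]) = (x :: ys) ++ [y] by simp, List.filter_append]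
          rw [List.filter_eq_nil_iff.mpr (by intro a ha; simpa using h1 a ha)]
          simp
        rw [hfilt]
        simp [pvStep, hlt]
      · by_cases heq : k y = M
        · have hmin : min M (k y) = M := by omega
          rw [hmin]
          have hfilt : ((x :: (ys ++ [y])).filter (fun z => decide (k z = M))).map π
              = ((x :: ys).filter (fun z => decide (k z = M))).map π ++ [π y] := by
            rw [show x :: (ys ++ [y]) = (x :: ys) ++ [y] by simp, List.filter_append]
            simp [heq]
          rw [hfilt]
          simp [pvStep, heq]
        · have hgt : M < k y := by omega
          have hmin : min M (k y) = M := by omega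
          rw [hmin]
          have hfilt : ((x :: (ys ++ [y])).filter (fun z => decide (k z = M))).map π
              = ((x :: ys).filter (fun z => decide (k z = M))).map π := by
            rw [show x :: (ys ++ [y]) = (x :: ys) ++ [y] by simp, List.filter_append]
            simp [heq]
          rw [hfilt]
          simp [pvStep, hlt, heq]

-- the same closed form when the pass runs over a mapped index list
theorem pvStage_spec_map {α : Type} (k : α → Int) (π : α → Int) (e : Int → α) (x : Int) (xs : List Int) :
    ((x :: xs).map e).foldl (pvStep k π) (none, []) =
      (some ((xs.map (k ∘ e)).foldl min ((k ∘ e) x)),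
       ((x :: xs).filter
          (fun j => decide ((k ∘ e) j = (xs.map (k ∘ e)).foldl min ((k ∘ e) x)))).map (π ∘ e)) := by
  rw [List.map_cons, pvStage_spec]
  congr 1
  · rw [List.map_map]
    rfl
  · rw [List.map_map, show e x :: xs.map e = (x :: xs).map e from rfl,
      List.filter_map, List.map_map]
    rfl

-- Python's min(xs, key) on a nonempty list as the bare first-minimum fold
theorem pvMin?_cons (key : Int → Int) (c : Int) (L : List Int) :
    PySem.List.min? (c :: L) key
      = some (L.foldl (fun m x => if (fun a b : Int => decide (a < b)) (key x) (key m) then x else m) c) := by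
  have hfun : (fun (m x : Int) => if (fun a b : Int => decide (a < b)) (key x) (key m) then x else m)
      = fun m x => if key x < key m then x else m := by
    funext m x; by_cases h : key x < key m <;> simp [h]
  rw [hfun]
  rw [PySem.List.min?]
  simp only [List.foldl_cons]
  induction L generalizing c with
  | nil => rfl
  | cons x L ih =>
      simp only [List.foldl_cons]
      by_cases h : key x < key c
      · simp only [if_pos h]; exact ih x
      · simp only [if_neg h]; exact ih c

-- characterization: r is the first index of range(len(particles)) attaining the
-- lexicographic minimum of B's composite key
def pvFM (particles : List (List Int × List Int × List Int)) (r : Int) : Prop :=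
  r ∈ PySem.List.pyRange 0 (PySem.List.len particles) 1 ∧
  (∀ j ∈ PySem.List.pyRange 0 (PySem.List.len particles) 1,
      pvLex3lt (pvKey3 particles j) (pvKey3 particles r) = false) ∧
  (∀ j ∈ PySem.List.pyRange 0 (PySem.List.len particles) 1,
      pvKey3 particles j = pvKey3 particles r → r ≤ j)

theorem pvFM_unique {particles : List (List Int × List Int × List Int)} {r r' : Int}
    (h1 : pvFM particles r) (h2 : pvFM particles r') : r = r' := by
  obtain ⟨hm1, hlt1, htie1⟩ := h1
  obtain ⟨hm2, hlt2, htie2⟩ := h2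
  have hk : pvKey3 particles r' = pvKey3 particles r :=
    pvLex3lt_antisymm (hlt1 r' hm2) (hlt2 r hm1)
  have := htie1 r' hm2 hk
  have := htie2 r hm1 hk.symm
  omega

theorem pvFM_B (particles : List (List Int × List Int × List Int))
    (hne : particles ≠ []) : pvFM particles (find_closest_particle_alt particles) := by
  have hn : 0 < PySem.List.len particles := by
    have := List.length_pos_of_ne_nil hne
    simp [PySem.List.len_eq]
    omega
  have hcons : PySem.List.pyRange 0 (PySem.List.len particles) 1
      = 0 :: PySem.List.pyRange 1 (PySem.List.len particles) 1 := by
    have := PySem.List.pyRange_one_cons hn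
    simpa using this
  obtain ⟨hmem, hmin, htie⟩ :=
    pvFoldMinFirst pvLex3lt pvLex3lt_irrefl
      (fun h1 h2 => pvLex3lt_trans h1 h2) (fun h1 h2 => pvLex3lt_antisymm h1 h2)
      (pvKey3 particles)
      (PySem.List.pyRange 1 (PySem.List.len particles) 1) 0
      (PySem.List.pairwise_lt_pyRange_one _ _)
      (by intro j hj; have := (PySem.List.mem_pyRange_one.mp hj).1; omega)
  have hval : find_closest_particle_alt particles
      = (PySem.List.pyRange 1 (PySem.List.len particles) 1).foldl
          (fun m x => if pvLex3lt (pvKey3 particles x) (pvKey3 particles m) then x else m) 0 := by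
    unfold find_closest_particle_alt
    rw [hcons]
  rw [hval]
  refine ⟨?_, ?_, ?_⟩
  · rw [hcons]
    rcases hmem with h | h
    · rw [h]; exact List.mem_cons_self
    · exact List.mem_cons_of_mem _ h
  · intro j hj
    rw [hcons] at hj
    rcases List.mem_cons.mp hj with rfl | hj'
    · exact hmin 0 (Or.inl rfl)
    · exact hmin j (Or.inr hj')
  · intro j hj hk
    rw [hcons] at hj
    rcases List.mem_cons.mp hj with rfl | hj'
    · exact htie 0 (Or.inl rfl) hk
    · exact htie j (Or.inr hj') hk

-- proof-side names for the three index keys A uses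
def pvF (particles : List (List Int × List Int × List Int)) (j : Int) : Int :=
  vector_magnitude ((PySem.List.pyGetD particles j ([], [], [])).2.2)
def pvG (particles : List (List Int × List Int × List Int)) (j : Int) : Int :=
  vector_magnitude ((PySem.List.pyGetD particles j ([], [], [])).2.1)
def pvH (particles : List (List Int × List Int × List Int)) (j : Int) : Int :=
  vector_magnitude ((PySem.List.pyGetD particles j ([], [], [])).1)

theorem pvKey3_eq (particles : List (List Int × List Int × List Int)) (j : Int) :
    pvKey3 particles j = (pvF particles j, pvG particles j, pvH particles j) := rfl

theorem pvFM_A (particles : List (List Int × List Int × List Int))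
    (hne : particles ≠ []) : pvFM particles (find_closest_particle particles) := by
  have hn : 0 < PySem.List.len particles := by
    have := List.length_pos_of_ne_nil hne
    simp [PySem.List.len_eq]
    omega
  have hcons : PySem.List.pyRange 0 (PySem.List.len particles) 1
      = 0 :: PySem.List.pyRange 1 (PySem.List.len particles) 1 := by
    have := PySem.List.pyRange_one_cons hn
    simpa using this
  -- stage 1 in closed form
  set M1 := ((PySem.List.pyRange 1 (PySem.List.len particles) 1).map (pvF particles)).foldl min
      (pvF particles 0) with hM1def
  have hs1 : (PySem.List.enumerate particles).foldl
        (pvStep (fun ip => vector_magnitude ip.2.2.2) (fun ip => ip.1)) (none, [])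
      = (some M1,
         (PySem.List.pyRange 0 (PySem.List.len particles) 1).filter
           (fun j => decide (pvF particles j = M1))) := by
    rw [hM1def, PySem.List.enumerate_eq_map_pyRange particles ([], [], []), hcons,
      pvStage_spec_map]
    rw [show ((fun (ip : Int × (List Int × List Int × List Int)) => ip.1) ∘
        (fun j => (j, PySem.List.pyGetD particles j ([], [], [])))) = fun j => j from rfl,
      List.map_id']
    rfl
  set cand := (PySem.List.pyRange 0 (PySem.List.len particles) 1).filter
      (fun j => decide (pvF particles j = M1)) with hcandDef
  have hmemc : ∀ j, j ∈ cand ↔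
      (j ∈ PySem.List.pyRange 0 (PySem.List.len particles) 1 ∧ pvF particles j = M1) := by
    intro j; simp [hcandDef, List.mem_filter]
  have hminf : ∀ j ∈ PySem.List.pyRange 0 (PySem.List.len particles) 1, M1 ≤ pvF particles j := by
    intro j hj
    rw [hcons] at hj
    rcases List.mem_cons.mp hj with rfl | hj'
    · exact (PySem.List.foldl_min_le _ _).1
    · exact (PySem.List.foldl_min_le _ _).2 _ (List.mem_map_of_mem hj')
  have hpwc : cand.Pairwise (· < ·) :=
    List.Pairwise.filter _ (PySem.List.pairwise_lt_pyRange_one _ _)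
  have hnec : cand ≠ [] := by
    rcases PySem.List.foldl_min_mem
        ((PySem.List.pyRange 1 (PySem.List.len particles) 1).map (pvF particles))
        (pvF particles 0) with hcase | hcase
    · exact List.ne_nil_of_mem ((hmemc 0).mpr ⟨by rw [hcons]; simp, hcase.symm⟩)
    · obtain ⟨j, hjR, hfj⟩ := List.mem_map.mp hcase
      exact List.ne_nil_of_mem ((hmemc j).mpr
        ⟨by rw [hcons]; exact List.mem_cons_of_mem _ hjR, hfj⟩)
  -- reduce the port to a decision on cand
  have hA : find_closest_particle particles
      = (if cand.length = 1 then cand.headD 0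
         else
           (if ((cand.foldl (pvStep
                (fun i => vector_magnitude ((PySem.List.pyGetD particles i ([], [], [])).2.1))
                (fun i => i)) (none, [])).2).length = 1 then
              ((cand.foldl (pvStep
                (fun i => vector_magnitude ((PySem.List.pyGetD particles i ([], [], [])).2.1))
                (fun i => i)) (none, [])).2).headD 0
            else
              (PySem.List.min? ((cand.foldl (pvStep
                  (fun i => vector_magnitude ((PySem.List.pyGetD particles i ([], [], [])).2.1))
                  (fun i => i)) (none, [])).2)
                (fun i => vector_magnitude ((PySem.List.pyGetD particles i ([], [], [])).1))).getD 0)) := by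
    unfold find_closest_particle
    rw [hs1]
  rw [hA]
  by_cases hlen : cand.length = 1
  · -- singleton accel candidate
    rw [if_pos hlen]
    obtain ⟨c, hc⟩ := List.length_eq_one_iff.mp hlen
    rw [hc]
    simp only [List.headD_cons]
    have hcmem := (hmemc c).mp (by rw [hc]; exact List.mem_cons_self)
    refine ⟨hcmem.1, ?_, ?_⟩
    · intro j hj
      rw [pvKey3_eq, pvKey3_eq]
      by_cases hfj : pvF particles j = M1
      · have hjc : j ∈ cand := (hmemc j).mpr ⟨hj, hfj⟩
        rw [hc] at hjc
        rcases List.mem_cons.mp hjc with rfl | hfalse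
        · exact pvLex3lt_irrefl _
        · simp at hfalse
      · have h1 := hminf j hj
        have h2 := hcmem.2
        simp [pvLex3lt]
        omega
    · intro j hj hkeq
      rw [pvKey3_eq, pvKey3_eq, Prod.mk.injEq, Prod.mk.injEq] at hkeq
      have hjc : j ∈ cand := (hmemc j).mpr ⟨hj, by rw [hkeq.1, hcmem.2]⟩
      rw [hc] at hjc
      rcases List.mem_cons.mp hjc with rfl | hfalse
      · exact le_refl _
      · simp at hfalse
  · rw [if_neg hlen]
    -- stage 2 in closed form
    obtain ⟨c2, cs2, hc2⟩ : ∃ c2 cs2, cand = c2 :: cs2 := by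
      cases hcand2 : cand with
      | nil => exact absurd hcand2 hnec
      | cons a l => exact ⟨a, l, rfl⟩
    set M2 := (cs2.map (pvG particles)).foldl min (pvG particles c2) with hM2def
    have hs2 : (cand.foldl (pvStep
          (fun i => vector_magnitude ((PySem.List.pyGetD particles i ([], [], [])).2.1))
          (fun i => i)) (none, [])).2
        = cand.filter (fun j => decide (pvG particles j = M2)) := by
      rw [hc2, pvStage_spec, List.map_id']
      rfl
    rw [hs2]
    set velC := cand.filter (fun j => decide (pvG particles j = M2)) with hvelDef
    have hmemv : ∀ j, j ∈ velC ↔ (j ∈ cand ∧ pvG particles j = M2) := by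
      intro j; simp [hvelDef, List.mem_filter]
    have hming : ∀ j ∈ cand, M2 ≤ pvG particles j := by
      intro j hj
      rw [hc2] at hj
      rcases List.mem_cons.mp hj with rfl | hj'
      · exact (PySem.List.foldl_min_le _ _).1
      · exact (PySem.List.foldl_min_le _ _).2 _ (List.mem_map_of_mem hj')
    have hpwv : velC.Pairwise (· < ·) := List.Pairwise.filter _ hpwc
    have hnev : velC ≠ [] := by
      rcases PySem.List.foldl_min_mem (cs2.map (pvG particles)) (pvG particles c2)
          with hcase | hcase
      · exact List.ne_nil_of_mem ((hmemv c2).mpr ⟨by rw [hc2]; exact List.mem_cons_self, hcase.symm⟩)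
      · obtain ⟨j, hjR, hfj⟩ := List.mem_map.mp hcase
        exact List.ne_nil_of_mem ((hmemv j).mpr
          ⟨by rw [hc2]; exact List.mem_cons_of_mem _ hjR, hfj⟩)
    have hvsub : ∀ j ∈ velC, j ∈ PySem.List.pyRange 0 (PySem.List.len particles) 1 ∧
        pvF particles j = M1 ∧ pvG particles j = M2 := by
      intro j hj
      obtain ⟨hjc, hg⟩ := (hmemv j).mp hj
      obtain ⟨hjr, hf⟩ := (hmemc j).mp hjc
      exact ⟨hjr, hf, hg⟩
    by_cases hlenv : velC.length = 1
    · rw [if_pos hlenv]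
      obtain ⟨c, hcv⟩ := List.length_eq_one_iff.mp hlenv
      rw [hcv]
      simp only [List.headD_cons]
      have hcmemv : c ∈ velC := by rw [hcv]; exact List.mem_cons_self
      obtain ⟨hcr, hcf, hcg⟩ := hvsub c hcmemv
      refine ⟨hcr, ?_, ?_⟩
      · intro j hj
        rw [pvKey3_eq, pvKey3_eq]
        by_cases hfj : pvF particles j = M1
        · have hjc : j ∈ cand := (hmemc j).mpr ⟨hj, hfj⟩
          by_cases hgj : pvG particles j = M2
          · have hjv : j ∈ velC := (hmemv j).mpr ⟨hjc, hgj⟩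
            rw [hcv] at hjv
            rcases List.mem_cons.mp hjv with rfl | hfalse
            · exact pvLex3lt_irrefl _
            · simp at hfalse
          · have h1 := hming j hjc
            simp [pvLex3lt]
            omega
        · have h1 := hminf j hj
          simp [pvLex3lt]
          omega
      · intro j hj hkeq
        rw [pvKey3_eq, pvKey3_eq, Prod.mk.injEq, Prod.mk.injEq] at hkeq
        have hjv : j ∈ velC := (hmemv j).mpr
          ⟨(hmemc j).mpr ⟨hj, by rw [hkeq.1, hcf]⟩, by rw [hkeq.2.1, hcg]⟩
        rw [hcv] at hjv
        rcases List.mem_cons.mp hjv with rfl | hfalse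
        · exact le_refl _
        · simp at hfalse
    · rw [if_neg hlenv]
      obtain ⟨cv, restv, hcv⟩ : ∃ cv restv, velC = cv :: restv := by
        cases hv2 : velC with
        | nil => exact absurd hv2 hnev
        | cons a l => exact ⟨a, l, rfl⟩
      have hkH : (fun i => vector_magnitude ((PySem.List.pyGetD particles i ([], [], [])).1))
          = pvH particles := rfl
      rw [hcv, hkH, pvMin?_cons (pvH particles) cv restv, Option.getD_some]
      have hpwr : restv.Pairwise (· < ·) := by
        have := hpwv; rw [hcv] at this; exact this.tail
      have hcvlt : ∀ j ∈ restv, cv < j := by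
        have := hpwv; rw [hcv] at this
        exact (List.pairwise_cons.mp this).1
      obtain ⟨hmem3, hmin3, htie3⟩ :=
        pvFoldMinFirst (fun a b : Int => decide (a < b))
          (fun a => by simp)
          (fun h1 h2 => by simp at h1 h2 ⊢; omega)
          (fun h1 h2 => by simp at h1 h2 ⊢; omega)
          (pvH particles) restv cv hpwr hcvlt
      set r := restv.foldl
          (fun m x => if (fun a b : Int => decide (a < b)) (pvH particles x) (pvH particles m)
            then x else m) cv with hrdef
      have hrv : r ∈ velC := by
        rw [hcv]
        rcases hmem3 with h | h
        · simp [h]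
        · exact List.mem_cons_of_mem _ h
      obtain ⟨hrr, hrf, hrg⟩ := hvsub r hrv
      have hmemv' : ∀ j, j ∈ velC → (j = cv ∨ j ∈ restv) := by
        intro j hj; rw [hcv] at hj; exact List.mem_cons.mp hj
      refine ⟨hrr, ?_, ?_⟩
      · intro j hj
        rw [pvKey3_eq, pvKey3_eq]
        by_cases hfj : pvF particles j = M1
        · have hjc : j ∈ cand := (hmemc j).mpr ⟨hj, hfj⟩
          by_cases hgj : pvG particles j = M2
          · have hjv : j ∈ velC := (hmemv j).mpr ⟨hjc, hgj⟩
            have hlt := hmin3 j (hmemv' j hjv)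
            simp at hlt
            simp [pvLex3lt]
            omega
          · have h1 := hming j hjc
            simp [pvLex3lt]
            omega
        · have h1 := hminf j hj
          simp [pvLex3lt]
          omega
      · intro j hj hkeq
        rw [pvKey3_eq, pvKey3_eq, Prod.mk.injEq, Prod.mk.injEq] at hkeq
        have hjv : j ∈ velC := (hmemv j).mpr
          ⟨(hmemc j).mpr ⟨hj, by rw [hkeq.1, hrf]⟩, by rw [hkeq.2.1, hrg]⟩
        exact htie3 j (hmemv' j hjv) hkeq.2.2

-- ===== VERDICT (by name: the statement is the Claim_ definition above) =====
theorem find_closest_particle_spec : Claim_equal_find_closest_particle := by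
  intro particles _ hpre
  unfold Spec_find_closest_particle
  exact pvFM_unique (pvFM_A particles hpre) (pvFM_B particles hpre)
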